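-- pv_equiv track=rewrite | github.com/mihayounas/codewars-challanges | years.py | solution
-- ===== SOURCE A (Python) =====
-- def solution(years):
--     result = []
--
--     for i in range(1, len(years)):
--         total_time = 0
--         travel_time = abs(years[i] - years[i-1])
--         if years[i] == years[i-1]:
--             total_time += 0
--         elif years[i] > years[i-1]:
--             total_time += 1
--         else:
--             total_time += 2
--         result.append(total_time)
--
--     return sum(result)
-- ===== SOURCE B (Python) =====
-- def solution(years):
--     # Divide and conquer: split the list at the midpoint, sharing the boundary
--     # element, so every adjacent pair is scored in exactly one half.
--     n = len(years)
--     if n < 2: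
--         return 0
--     if n == 2:
--         a, b = years
--         return 1 if b > a else 2 if b < a else 0
--     m = n // 2
--     return solution(years[:m + 1]) + solution(years[m:])
-- ===== Notes on version B (the rewrite author's own statement) =====
-- stated objective: alternative
-- what changed: Replaces A's linear index loop that appends a per-pair score to a result list and sums it with a divide-and-conquer recursion: split the list at the midpoint with a shared boundary element and add the answers of the two halves, so no index arithmetic, no intermediate list and no linear scan appear.
import Mathlib
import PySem

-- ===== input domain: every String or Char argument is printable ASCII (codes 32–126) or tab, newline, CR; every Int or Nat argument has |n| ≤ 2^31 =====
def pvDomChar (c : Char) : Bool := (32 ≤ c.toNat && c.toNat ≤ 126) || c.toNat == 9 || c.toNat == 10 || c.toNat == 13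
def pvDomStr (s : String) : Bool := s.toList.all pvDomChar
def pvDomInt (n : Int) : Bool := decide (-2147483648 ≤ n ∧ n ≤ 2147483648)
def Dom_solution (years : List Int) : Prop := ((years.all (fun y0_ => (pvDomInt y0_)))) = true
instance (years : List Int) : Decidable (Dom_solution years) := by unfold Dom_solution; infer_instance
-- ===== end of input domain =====

-- B replaces A's index loop + per-pair result list with a divide-and-conquer
-- recursion over the list (midpoint split with a shared boundary element);
-- same result, different decomposition (return value only).

-- ===== PORT A =====
def solution (years : List Int) : Int :=
  let result : List Int :=
    (PySem.List.pyRange 1 (years.length : Int) 1).foldl (fun res i =>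
      let total_time : Int := 0
      let _travel_time : Int :=
        |PySem.List.pyGetD years i 0 - PySem.List.pyGetD years (i - 1) 0|
      let total_time : Int :=
        if PySem.List.pyGetD years i 0 = PySem.List.pyGetD years (i - 1) 0 then
          total_time + 0
        else if PySem.List.pyGetD years i 0 > PySem.List.pyGetD years (i - 1) 0 then
          total_time + 1
        else
          total_time + 2
      res ++ [total_time]) []
  result.sum

-- ===== PORT B =====
-- years[:m+1] and years[m:] with 0 ≤ m < n are exactly take (m+1) / drop m.
-- pvFuel = years.length is only a structural-termination guard (each recursive
-- call strictly shrinks the list, so the fuel is never exhausted).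
def solGo : Nat → List Int → Int
  | 0, _ => 0
  | fuel + 1, years =>
    let n := years.length
    if n < 2 then 0
    else if n = 2 then
      match years with
      | a :: b :: _ => if b > a then 1 else if b < a then 2 else 0
      | _ => 0
    else
      let m := n / 2
      solGo fuel (years.take (m + 1)) + solGo fuel (years.drop m)

def solution_alt (years : List Int) : Int := solGo years.length years

-- ===== PRECONDITION & SPEC =====
def Spec_solution (years : List Int) (out : Int) : Prop := out = solution_alt years
instance (years : List Int) (out : Int) : Decidable (Spec_solution years out) := by unfold Spec_solution; infer_instance

-- ===== CLAIM (what is proved, stated in full; the proofs are below) =====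
def Claim_equal_solution : Prop := ∀ (years : List Int), Dom_solution years → Spec_solution years (solution years)

-- ===== LEMMAS AND PROOFS =====

-- A's per-pair contribution
def pvContrib (a b : Int) : Int := if b = a then 0 else if b > a then 1 else 2

-- reference linear recursion both ports are reduced to
def pvG : List Int → Int
  | [] => 0
  | [_] => 0
  | a :: b :: t => pvContrib a b + pvG (b :: t)

-- the append-loop is a map
theorem pv_foldl_append {α β : Type} (f : α → β) :
    ∀ (l : List α) (acc : List β),
      l.foldl (fun res i => res ++ [f i]) acc = acc ++ l.map f := by
  intro l
  induction l with
  | nil => intro acc; simp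
  | cons x xs ih => intro acc; simp [List.foldl_cons, ih]

theorem pv_pairs_map (xs : List Int) :
    (PySem.List.pyRange 1 (xs.length : Int) 1).map
      (fun i => pvContrib (PySem.List.pyGetD xs (i - 1) 0) (PySem.List.pyGetD xs i 0))
    = (xs.zip (xs.drop 1)).map (fun p => pvContrib p.1 p.2) := by
  apply List.ext_getElem
  · simp [PySem.List.length_pyRange_one]
  · intro k h1 h2
    simp only [List.getElem_map, PySem.List.getElem_pyRange_one, List.getElem_zip]
    have hk : k < xs.length - 1 := by
      simpa [PySem.List.length_pyRange_one] using h1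
    have hk1 : k + 1 < xs.length := by omega
    have e0 : ((1 : Int) + k - 1) = ((k : Nat) : Int) := by omega
    have e0' : ((1 : Int) + k) = ((k + 1 : Nat) : Int) := by omega
    rw [e0, e0', PySem.List.pyGetD_natCast, PySem.List.pyGetD_natCast]
    rw [List.getD_eq_getElem?_getD, List.getD_eq_getElem?_getD,
      List.getElem?_eq_getElem (by omega : k < xs.length),
      List.getElem?_eq_getElem hk1]
    simp

theorem pv_sum_pairs_eq_g :
    ∀ (xs : List Int),
      ((xs.zip (xs.drop 1)).map (fun p => pvContrib p.1 p.2)).sum = pvG xs := by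
  intro xs
  induction xs with
  | nil => simp [pvG]
  | cons a t ih =>
    cases t with
    | nil => simp [pvG]
    | cons b r =>
      have ih' : (((b :: r).zip r).map (fun p => pvContrib p.1 p.2)).sum = pvG (b :: r) := by
        simpa using ih
      simp only [List.drop_succ_cons, List.drop_zero, List.zip_cons_cons,
        List.map_cons, List.sum_cons, pvG, ih']

-- A equals pvG
theorem pv_A_eq_g (xs : List Int) : solution xs = pvG xs := by
  unfold solution
  simp only []
  rw [show (fun (res : List Int) (i : Int) =>
        let total_time : Int := 0
        let _travel_time : Int :=
          |PySem.List.pyGetD xs i 0 - PySem.List.pyGetD xs (i - 1) 0|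
        let total_time : Int :=
          if PySem.List.pyGetD xs i 0 = PySem.List.pyGetD xs (i - 1) 0 then
            total_time + 0
          else if PySem.List.pyGetD xs i 0 > PySem.List.pyGetD xs (i - 1) 0 then
            total_time + 1
          else
            total_time + 2
        res ++ [total_time])
      = (fun res i => res ++
          [pvContrib (PySem.List.pyGetD xs (i - 1) 0) (PySem.List.pyGetD xs i 0)])
      from by funext res i; simp [pvContrib]]
  rw [pv_foldl_append, List.nil_append, pv_pairs_map, pv_sum_pairs_eq_g]

-- pvG is additive over a split sharing one boundary element
theorem pv_g_split :
    ∀ (u : List Int) (x : Int) (r : List Int),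
      pvG (u ++ x :: r) = pvG (u ++ [x]) + pvG (x :: r) := by
  intro u
  induction u with
  | nil => intro x r; simp [pvG]
  | cons a t ih =>
    intro x r
    cases t with
    | nil => simp [pvG]
    | cons b s =>
      have h1 : pvG (a :: b :: s ++ x :: r) = pvContrib a b + pvG (b :: s ++ x :: r) := rfl
      have h2 : pvG (a :: b :: s ++ [x]) = pvContrib a b + pvG (b :: s ++ [x]) := rfl
      simp only [List.cons_append] at *
      rw [h1, h2, ih x r]
      ring

-- B equals pvG, by induction on the fuel
theorem pv_go_eq_g : ∀ (fuel : Nat) (xs : List Int), xs.length ≤ fuel → solGo fuel xs = pvG xs := by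
  intro fuel
  induction fuel with
  | zero =>
    intro xs h
    match xs, h with
    | [], _ => simp [solGo, pvG]
  | succ f ih =>
    intro xs h
    unfold solGo
    by_cases h2 : xs.length < 2
    · match xs, h2 with
      | [], _ => simp [pvG]
      | [a], _ => simp [pvG]
    · simp only [h2, if_false]
      by_cases he : xs.length = 2
      · simp only [he, reduceIte]
        match xs, he with
        | [a, b], _ =>
          simp only [pvG, pvContrib]
          split_ifs <;> omega
      · simp only [he, if_false]
        have hn3 : 3 ≤ xs.length := by omega
        set m := xs.length / 2 with hm
        have hm1 : 1 ≤ m := by omega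
        have hm2 : m + 1 < xs.length := by omega
        have hx : ∃ x, xs[m]? = some x := by
          rw [List.getElem?_eq_getElem (by omega)]; exact ⟨_, rfl⟩
        obtain ⟨x, hxm⟩ := hx
        have hdecomp : xs = xs.take m ++ x :: xs.drop (m + 1) := by
          conv_lhs => rw [← List.take_append_drop m xs]
          congr 1
          rw [List.drop_eq_getElem_cons (by omega)]
          rw [List.getElem?_eq_getElem (by omega)] at hxm
          simp at hxm
          simp [hxm]
        have htake : xs.take (m + 1) = xs.take m ++ [x] := by
          rw [List.take_add_one, hxm]
          simp
        have hdrop : xs.drop m = x :: xs.drop (m + 1) := by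
          rw [List.drop_eq_getElem_cons (by omega)]
          rw [List.getElem?_eq_getElem (by omega)] at hxm
          simp at hxm
          simp [hxm]
        rw [ih (xs.take (m + 1)) (by simp; omega),
            ih (xs.drop m) (by simp; omega)]
        rw [htake, hdrop, ← pv_g_split]
        rw [← hdecomp]

theorem pv_B_eq_g (xs : List Int) : solution_alt xs = pvG xs :=
  pv_go_eq_g xs.length xs (le_refl _)

-- ===== VERDICT (by name: the statement is the Claim_ definition above) =====
theorem solution_spec : Claim_equal_solution := by
  intro years _
  show solution years = solution_alt years
  rw [pv_A_eq_g, pv_B_eq_g]
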